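-- pv_equiv track=rewrite | github.com/jramaswami/Binary_Search_Python | k_maximum_sums.py | solve
-- ===== SOURCE A (Python) =====
-- import itertools
--
-- def solve(nums, k):
--
--     prefix = list(itertools.accumulate(nums))
--
--     def get_sum(left, right):
--         if left - 1 < 0:
--             return prefix[right]
--         return prefix[right] - prefix[left-1]
--
--
--     solns = [get_sum(left, right)
--              for left, _ in enumerate(nums)
--              for right, _ in enumerate(nums[left:], start=left)
--     ]
--     solns.sort()
--     return solns[-k:]
-- ===== SOURCE B (Python) =====
-- def solve(nums, k):
--     # Online top-k selection: keep a sorted buffer of at most k largest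
--     # subarray sums (running sums per start index), no global sort.
--     top = []
--     for left in range(len(nums)):
--         s = 0
--         for x in nums[left:]:
--             s += x
--             i = 0
--             while i < len(top) and top[i] < s:
--                 i += 1
--             top.insert(i, s)
--             if len(top) > k:
--                 top.pop(0)
--     return top
-- ===== Notes on version B (the rewrite author's own statement) =====
-- stated objective: alternative
-- what changed: A materialises all n(n+1)/2 subarray sums via a prefix array, sorts them all and slices the tail; B streams running sums and maintains a sorted bounded buffer of at most k elements (insert in order, drop the smallest when over k), so no prefix array and no global sort.
-- intended difference: On nonempty nums with k <= 0 and -k smaller than the number n(n+1)/2 of subarrays, A's solns[-k:] slice accidentally returns a nonempty tail of the full sorted list (everything for k = 0), while B returns the intended [] since zero or fewer maxima were requested. — e.g. on solve([1], 0): A returns [1], B returns []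
import Mathlib
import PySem

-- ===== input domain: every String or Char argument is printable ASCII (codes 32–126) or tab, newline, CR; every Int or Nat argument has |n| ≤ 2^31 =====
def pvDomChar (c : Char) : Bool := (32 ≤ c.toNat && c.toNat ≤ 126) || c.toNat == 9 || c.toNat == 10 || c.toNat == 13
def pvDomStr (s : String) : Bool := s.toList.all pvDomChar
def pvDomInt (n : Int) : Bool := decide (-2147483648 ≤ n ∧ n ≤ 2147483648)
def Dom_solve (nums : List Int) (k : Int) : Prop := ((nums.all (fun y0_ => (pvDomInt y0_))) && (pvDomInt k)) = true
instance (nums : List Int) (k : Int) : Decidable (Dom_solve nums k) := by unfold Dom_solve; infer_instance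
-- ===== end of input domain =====

-- B replaces A's generate-all/sort-all/slice approach by online top-k selection into a
-- sorted bounded buffer (alternative algorithm); on k ≤ 0 B returns [] where A's `[-k:]`
-- slice accidentally returns a nonempty list (stated as an intended difference D_).


-- ===== PORT A =====
-- itertools.accumulate(nums): running sums, no initial element
def accGo (s : Int) : List Int → List Int
  | [] => []
  | y :: ys => (s + y) :: accGo (s + y) ys

def pyAccumulate : List Int → List Int
  | [] => []
  | x :: xs => x :: accGo x xs

-- get_sum(left, right); the prefix indices are provably in range, so pyGetD is exact here
def getSum (pref : List Int) (left right : Int) : Int :=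
  if left - 1 < 0 then PySem.List.pyGetD pref right 0
  else PySem.List.pyGetD pref right 0 - PySem.List.pyGetD pref (left - 1) 0

def solve (nums : List Int) (k : Int) : List Int :=
  let pref := pyAccumulate nums
  let solns := (PySem.List.enumerate nums).flatMap (fun l =>
    (PySem.List.enumerate (PySem.List.slice nums (some l.1) none) l.1).map
      (fun r => getSum pref l.1 r.1))
  let solns := PySem.List.sorted solns (fun x => x)
  PySem.List.slice solns (some (-k)) none

-- ===== PORT B =====
-- `i = 0; while i < len(top) and top[i] < s: i += 1` — the index walk over top, step for step:
-- `i < len(top)` ↔ the unscanned suffix is nonempty, and its head is top[i]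
def scanGo (s : Int) : List Int → Nat → Nat
  | [], i => i
  | v :: rest, i => if v < s then scanGo s rest (i + 1) else i
def scanPos (top : List Int) (s : Int) : Nat := scanGo s top 0

-- body of the inner loop after `s += x`: insert s, trim the front if over k (`top.pop(0)` on a nonempty list = tail)
def stepB (k : Int) (top : List Int) (s : Int) : List Int :=
  let top' := PySem.List.insert top (scanPos top s : Int) s
  if (top'.length : Int) > k then top'.tail else top'

def solve_alt (nums : List Int) (k : Int) : List Int :=
  (PySem.List.pyRange 0 (nums.length : Int)).foldl (fun top left =>
    ((PySem.List.slice nums (some left) none).foldl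
      (fun (st : List Int × Int) x =>
        let s := st.2 + x
        (stepB k st.1 s, s)) (top, 0)).1) []

-- ===== PRECONDITION & SPEC =====
-- On nonempty nums with k ≤ 0 and -k smaller than the number n(n+1)/2 of subarrays, A's
-- `solns[-k:]` slice accidentally returns the nonempty tail solns[-k:] of ALL sorted sums
-- (everything for k = 0), while B returns the intended [] — zero or fewer maxima were asked for.
def D_solve (nums : List Int) (k : Int) : Prop :=
  nums ≠ [] ∧ k ≤ 0 ∧ 2 * (-k) < (nums.length : Int) * ((nums.length : Int) + 1)
instance (nums : List Int) (k : Int) : Decidable (D_solve nums k) := by unfold D_solve; infer_instance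

def Spec_solve (nums : List Int) (k : Int) (out : List Int) : Prop := ¬ D_solve nums k → out = solve_alt nums k
instance (nums : List Int) (k : Int) (out : List Int) : Decidable (Spec_solve nums k out) := by unfold Spec_solve; infer_instance

def pvDiffWitness_solve : List Int × Int := ([1], 0)
def pvDiffWitnessOut_solve : (List Int) × (List Int) := ([1], [])

-- ===== CLAIM (what is proved, stated in full; the proofs are below) =====
def Claim_unchanged_solve : Prop := ∀ (nums : List Int) (k : Int), Dom_solve nums k → Spec_solve nums k (solve nums k)
def Claim_changed_solve : Prop := Dom_solve (pvDiffWitness_solve.1) (pvDiffWitness_solve.2) ∧ D_solve (pvDiffWitness_solve.1) (pvDiffWitness_solve.2) ∧ solve (pvDiffWitness_solve.1) (pvDiffWitness_solve.2) = pvDiffWitnessOut_solve.1 ∧ solve_alt (pvDiffWitness_solve.1) (pvDiffWitness_solve.2) = pvDiffWitnessOut_solve.2 ∧ pvDiffWitnessOut_solve.1 ≠ pvDiffWitnessOut_solve.2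
def Claim_exact_solve : Prop := ∀ (nums : List Int) (k : Int), Dom_solve nums k → D_solve nums k → solve nums k ≠ solve_alt nums k

-- ===== LEMMAS AND PROOFS =====

-- the canonical multiset of subarray sums, in the order both programs generate it
def sumsList (nums : List Int) : List Int :=
  (List.range nums.length).flatMap (fun l => accGo 0 (nums.drop l))

theorem accGo_length (s : Int) (ys : List Int) : (accGo s ys).length = ys.length := by
  induction ys generalizing s with
  | nil => rfl
  | cons y t ih => simp [accGo, ih]

theorem accGo_getElem (s : Int) (ys : List Int) (j : Nat) (h : j < (accGo s ys).length) :
    (accGo s ys)[j] = s + (ys.take (j + 1)).sum := by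
  induction ys generalizing s j with
  | nil => simp [accGo_length] at h
  | cons y t ih =>
    cases j with
    | zero => simp [accGo]
    | succ j =>
      simp only [accGo, List.getElem_cons_succ, List.take_succ_cons, List.sum_cons]
      rw [ih]
      ring

theorem pyAccumulate_eq (nums : List Int) : pyAccumulate nums = accGo 0 nums := by
  cases nums with
  | nil => rfl
  | cons x xs => simp [pyAccumulate, accGo, zero_add]

-- ----- A's solns is sumsList -----
theorem pref_getD (nums : List Int) (t : Nat) (h : t < nums.length) :
    (pyAccumulate nums).getD t 0 = (nums.take (t + 1)).sum := by
  have hlen : (pyAccumulate nums).length = nums.length := by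
    rw [pyAccumulate_eq, accGo_length]
  rw [pyAccumulate_eq, List.getD_eq_getElem _ _ (by rw [accGo_length]; omega)]
  have := accGo_getElem 0 nums t (by rwa [accGo_length])
  simpa using this

theorem inner_map_eq (nums : List Int) (i : Nat) (hi : i < nums.length) :
    ((PySem.List.enumerate (nums.drop i) (i : Int)).map
      (fun r => getSum (pyAccumulate nums) (i : Int) r.1)) = accGo 0 (nums.drop i) := by
  apply List.ext_getElem
  · simp [PySem.List.length_enumerate, accGo_length]
  · intro j h1 h2
    have hj : j < (nums.drop i).length := by
      simpa [PySem.List.length_enumerate] using h1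
    rw [List.getElem_map, PySem.List.getElem_enumerate _ _ _ (by simpa using hj),
      accGo_getElem _ _ _ (by rwa [accGo_length])]
    have hij : i + j < nums.length := by
      rw [List.length_drop] at hj; omega
    have hsplit : ((nums.drop i).take (j + 1)).sum
        = (nums.take (i + (j + 1))).sum - (nums.take i).sum := by
      have h0 : nums.take (i + (j + 1)) = nums.take i ++ (nums.drop i).take (j + 1) :=
        List.take_add
      rw [h0, List.sum_append]; ring
    show getSum (pyAccumulate nums) (i : Int) ((i : Int) + (j : Int)) = _
    unfold getSum
    by_cases hzero : (i : Int) - 1 < 0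
    · have hi0 : i = 0 := by omega
      subst hi0
      rw [if_pos hzero]
      rw [show ((0 : Nat) : Int) + (j : Int) = ((j : Nat) : Int) by omega,
        PySem.List.pyGetD_natCast, pref_getD nums j (by omega)]
      simp
    · have hi1 : 1 ≤ i := by omega
      rw [if_neg hzero,
        show ((i : Nat) : Int) + (j : Int) = (((i + j : Nat)) : Int) by push_cast; ring,
        show ((i : Nat) : Int) - 1 = (((i - 1 : Nat)) : Int) by omega,
        PySem.List.pyGetD_natCast, PySem.List.pyGetD_natCast,
        pref_getD nums (i + j) hij, pref_getD nums (i - 1) (by omega)]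
      rw [hsplit, show i - 1 + 1 = i by omega, show i + (j + 1) = i + j + 1 by omega]
      omega

theorem solns_eq (nums : List Int) :
    ((PySem.List.enumerate nums).flatMap (fun l =>
      (PySem.List.enumerate (PySem.List.slice nums (some l.1) none) l.1).map
        (fun r => getSum (pyAccumulate nums) l.1 r.1))) = sumsList nums := by
  rw [sumsList, PySem.List.enumerate_eq_map_pyRange nums 0, PySem.List.len_eq,
    PySem.List.pyRange_zero_natCast, List.map_map, List.flatMap_map]
  apply List.flatMap_congr
  intro i hi
  have hi' : i < nums.length := List.mem_range.mp hi
  show ((PySem.List.enumerate (PySem.List.slice nums (some (i : Int)) none) (i : Int)).map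
      (fun r => getSum (pyAccumulate nums) (i : Int) r.1)) = _
  rw [PySem.List.slice_from_natCast, inner_map_eq nums i hi']

theorem solve_eq (nums : List Int) (k : Int) :
    solve nums k = PySem.List.slice (PySem.List.sorted (sumsList nums) (fun x => x)) (some (-k)) none := by
  show PySem.List.slice (PySem.List.sorted _ _) (some (-k)) none = _
  rw [solns_eq]

-- ----- B folds stepB over sumsList -----
theorem inner_fold (k : Int) (ys : List Int) (top : List Int) (s0 : Int) :
    (ys.foldl (fun (st : List Int × Int) x =>
        let s := st.2 + x
        (stepB k st.1 s, s)) (top, s0)) = ((accGo s0 ys).foldl (stepB k) top, s0 + ys.sum) := by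
  induction ys generalizing top s0 with
  | nil => simp [accGo]
  | cons y t ih => simp [accGo, ih, add_assoc]

theorem solve_alt_eq (nums : List Int) (k : Int) :
    solve_alt nums k = (sumsList nums).foldl (stepB k) [] := by
  unfold solve_alt
  rw [sumsList, List.foldl_flatMap, PySem.List.pyRange_zero_natCast, List.foldl_map]
  refine PySem.List.foldl_congr_mem _ _ _ _ (fun top l _ => ?_)
  simp [PySem.List.slice_from_natCast, inner_fold]

-- ----- the scan finds the leftmost position whose element is not < s -----
theorem scanGo_eq (s : Int) (top : List Int) (i : Nat) :
    scanGo s top i = i + (top.takeWhile (fun v => decide (v < s))).length := by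
  induction top generalizing i with
  | nil => simp [scanGo]
  | cons v rest ih =>
    by_cases h : v < s
    · simp [scanGo, h, ih]; omega
    · simp [scanGo, h]

-- ----- stepB on a sorted buffer is orderedInsert + trim -----
theorem insert_scanPos (top : List Int) (s : Int) :
    PySem.List.insert top (scanPos top s : Int) s = List.orderedInsert (· ≤ ·) s top := by
  have hp : (fun b : Int => decide ¬ s ≤ b) = (fun v : Int => decide (v < s)) := by
    funext b; simp [not_le]
  have hpos : scanPos top s = (top.takeWhile (fun v => decide (v < s))).length := by
    simpa using scanGo_eq s top 0
  have hle : (top.takeWhile (fun v => decide (v < s))).length ≤ top.length :=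
    (List.takeWhile_prefix _).length_le
  rw [hpos, PySem.List.insert_natCast _ _ _ hle, List.orderedInsert_eq_take_drop, hp]
  have htake : top.take (top.takeWhile (fun v => decide (v < s))).length =
      top.takeWhile (fun v => decide (v < s)) :=
    (List.prefix_iff_eq_take.mp (List.takeWhile_prefix _)).symm
  have hdrop : top.drop (top.takeWhile (fun v => decide (v < s))).length =
      top.dropWhile (fun v => decide (v < s)) := by
    have h2 := List.drop_left' (l₁ := top.takeWhile (fun v => decide (v < s)))
      (l₂ := top.dropWhile (fun v => decide (v < s))) rfl
    rwa [List.takeWhile_append_dropWhile] at h2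
  rw [htake, hdrop]

theorem stepB_eq (k : Int) (top : List Int) (s : Int) :
    stepB k top s =
      (if ((List.orderedInsert (· ≤ ·) s top).length : Int) > k
       then (List.orderedInsert (· ≤ ·) s top).tail
       else List.orderedInsert (· ≤ ·) s top) := by
  rw [stepB, insert_scanPos]

-- ----- sorted(ys ++ [x]) is orderedInsert into sorted(ys) -----
theorem sorted_append_singleton (ys : List Int) (x : Int) :
    PySem.List.sorted (ys ++ [x]) (fun v => v) =
      List.orderedInsert (· ≤ ·) x (PySem.List.sorted ys (fun v => v)) := by
  apply PySem.List.sorted_id_eq_of_perm_of_pairwise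
  · exact (List.perm_orderedInsert _ x _).trans
      (((PySem.List.sorted_perm ys (fun v => v) false).cons x).trans
        (List.perm_append_singleton x ys).symm)
  · exact List.Pairwise.orderedInsert x _ (PySem.List.sorted_pairwise ys (fun v => v))

-- ----- dropping past an orderedInsert in a sorted list -----
theorem orderedInsert_all_ge (l : List Int) (x : Int) (h : ∀ b ∈ l, x ≤ b) :
    List.orderedInsert (· ≤ ·) x l = x :: l := by
  cases l with
  | nil => rfl
  | cons b t => simp [List.orderedInsert, h b (by simp)]

theorem tail_orderedInsert_drop (S : List Int) (x : Int) (d : Nat)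
    (hS : S.Pairwise (· ≤ ·)) :
    (List.orderedInsert (· ≤ ·) x (S.drop d)).tail =
      (List.orderedInsert (· ≤ ·) x S).drop (d + 1) := by
  induction S generalizing d with
  | nil => simp [List.orderedInsert]
  | cons a t ih =>
    rw [List.pairwise_cons] at hS
    cases d with
    | zero => simp
    | succ d =>
      simp only [List.drop_succ_cons, List.orderedInsert]
      by_cases hxa : x ≤ a
      · rw [if_pos hxa, orderedInsert_all_ge]
        · simp
        · exact fun b hb => le_trans hxa (hS.1 b (List.mem_of_mem_drop hb))
      · rw [if_neg hxa]
        simpa using ih d hS.2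

-- ----- the main invariant: the buffer is the top k of the sorted prefix -----
theorem fold_stepB (k : Int) (ys : List Int) :
    ys.foldl (stepB k) [] =
      (PySem.List.sorted ys (fun v => v)).drop (ys.length - k.toNat) := by
  induction ys using List.reverseRecOn with
  | nil =>
    have h : PySem.List.sorted ([] : List Int) (fun v => v) = [] :=
      (PySem.List.sorted_eq_nil_iff _ _ _).mpr rfl
    simp [h]
  | append_singleton ys x ih =>
    rw [List.foldl_append, List.foldl_cons, List.foldl_nil, ih, stepB_eq,
      sorted_append_singleton]
    set S := PySem.List.sorted ys (fun v => v) with hSdef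
    have hlenS : S.length = ys.length := PySem.List.length_sorted ys _ _
    have hSpw : S.Pairwise (· ≤ ·) := PySem.List.sorted_pairwise ys (fun v => v)
    set m := ys.length with hm
    set K := k.toNat with hK
    have hlen : (List.orderedInsert (· ≤ ·) x (S.drop (m - K))).length
        = (m - (m - K)) + 1 := by
      rw [List.orderedInsert_length, List.length_drop, hlenS]
    by_cases hk : k ≤ 0
    · -- k ≤ 0 : buffer stays empty, both sides are []
      have hK0 : K = 0 := by simp [hK, Int.toNat_of_nonpos hk]
      have hdm : S.drop (m - K) = [] := by
        rw [List.drop_eq_nil_iff, hlenS]; omega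
      rw [hdm]
      have hcond : (((List.orderedInsert (· ≤ ·) x ([] : List Int)).length : Nat) : Int) > k := by
        simp [List.orderedInsert]; omega
      rw [if_pos hcond]
      have h1 : (List.orderedInsert (· ≤ ·) x ([] : List Int)).tail = [] := rfl
      rw [h1, eq_comm, List.drop_eq_nil_iff, List.orderedInsert_length, hlenS, List.length_append]
      simp
      omega
    · rw [not_le] at hk
      have hkK : (K : Int) = k := Int.toNat_of_nonneg (le_of_lt hk)
      by_cases hmK : m < K
      · -- buffer not yet full: no trimming
        have hd0 : m - K = 0 := by omega
        have hcond : ¬ (((List.orderedInsert (· ≤ ·) x (S.drop (m - K))).length : Int) > k) := by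
          rw [hlen]; push_cast; omega
        rw [if_neg hcond, hd0, List.drop_zero]
        have : (ys.length + 1) - K = 0 := by omega
        simp [this, hSdef]
      · have hmK : K ≤ m := by omega
        -- buffer full: insert then pop the front
        have hcond : (((List.orderedInsert (· ≤ ·) x (S.drop (m - K))).length : Int) > k) := by
          rw [hlen]; push_cast; omega
        rw [if_pos hcond, tail_orderedInsert_drop S x (m - K) hSpw]
        have : (ys.length + 1) - K = (m - K) + 1 := by omega
        rw [List.length_append, List.length_singleton, this]

theorem sum_range_sub (n : Nat) :
    2 * (((List.range n).map (fun l => n - l)).sum) = n * (n + 1) := by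
  induction n with
  | zero => simp
  | succ n ih =>
    rw [List.range_succ, List.map_append, List.sum_append]
    have hcong : (List.range n).map (fun l => n + 1 - l)
        = (List.range n).map (fun l => (n - l) + 1) := by
      apply List.map_congr_left
      intro a ha
      have := List.mem_range.mp ha
      omega
    rw [hcong, List.sum_map_add]
    have hone : ((List.range n).map (fun _ => (1 : Nat))).sum = n := by simp
    have hrw : (n + 1) * (n + 1 + 1) = n * (n + 1) + 2 * (n + 1) := by ring
    rw [hrw]
    simp only [List.map_cons, List.map_nil, List.sum_cons, List.sum_nil, hone]
    have ih' : 2 * (((List.range n).map (HSub.hSub n)).sum) = n * (n + 1) := ih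
    omega

theorem length_sumsList (nums : List Int) :
    2 * (sumsList nums).length = nums.length * (nums.length + 1) := by
  rw [sumsList, List.length_flatMap]
  have hcong : (List.range nums.length).map (fun a => (accGo 0 (nums.drop a)).length)
      = (List.range nums.length).map (fun l => nums.length - l) := by
    apply List.map_congr_left
    intro a _
    rw [accGo_length, List.length_drop]
  rw [hcong, sum_range_sub]

theorem solve_alt_char (nums : List Int) (k : Int) :
    solve_alt nums k =
      (PySem.List.sorted (sumsList nums) (fun v => v)).drop ((sumsList nums).length - k.toNat) := by
  rw [solve_alt_eq, fold_stepB]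

-- ===== VERDICT (by name: the statement is the Claim_ definition above) =====
theorem len_cast (nums : List Int) :
    ((nums.length * (nums.length + 1) : Nat) : Int)
      = (nums.length : Int) * ((nums.length : Int) + 1) := by
  push_cast; ring

theorem solve_spec : Claim_unchanged_solve := by
  intro nums k _ hnd
  show solve nums k = solve_alt nums k
  rw [solve_eq, solve_alt_char]
  by_cases hk : 1 ≤ k
  · have hK : 0 < k.toNat := by omega
    have hkk : -k = -((k.toNat : Nat) : Int) := by omega
    rw [hkk, PySem.List.slice_from_neg_natCast _ _ hK, PySem.List.length_sorted]
  · rw [not_le] at hk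
    have hk0 : k ≤ 0 := by omega
    have hKa : k.toNat = 0 := by omega
    have hlen2 := length_sumsList nums
    have hcast := len_cast nums
    by_cases hnil : nums = []
    · subst hnil
      have hs : PySem.List.sorted (sumsList ([] : List Int)) (fun x => x) = [] :=
        (PySem.List.sorted_eq_nil_iff _ _ _).mpr rfl
      rw [hs, PySem.List.slice_from _ (by omega : (0 : Int) ≤ -k)]
      simp
    · have hge : (nums.length : Int) * ((nums.length : Int) + 1) ≤ 2 * (-k) := by
        have : ¬ (nums ≠ [] ∧ k ≤ 0 ∧
            2 * (-k) < (nums.length : Int) * ((nums.length : Int) + 1)) := hnd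
        simp only [hnil, hk0, ne_eq, not_false_eq_true, true_and] at this
        omega
      have hless : (sumsList nums).length ≤ (-k).toNat := by omega
      rw [PySem.List.slice_from _ (by omega : (0 : Int) ≤ -k), hKa]
      rw [List.drop_eq_nil_iff.mpr (by rw [PySem.List.length_sorted]; omega),
        List.drop_eq_nil_iff.mpr (by rw [PySem.List.length_sorted]; omega)]

theorem solve_changed : Claim_changed_solve := by
  unfold Claim_changed_solve; decide

theorem solve_tight : Claim_exact_solve := by
  intro nums k _ hd
  obtain ⟨hne, hk0, hlt⟩ := hd
  rw [solve_eq, solve_alt_char]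
  have hKa : k.toNat = 0 := by omega
  have hlen2 := length_sumsList nums
  have hcast := len_cast nums
  have hlt' : (-k).toNat < (sumsList nums).length := by omega
  rw [hKa, PySem.List.slice_from _ (by omega : (0 : Int) ≤ -k)]
  intro heq
  have hB : List.drop ((sumsList nums).length - 0)
      (PySem.List.sorted (sumsList nums) (fun v => v)) = [] :=
    List.drop_eq_nil_iff.mpr (by rw [PySem.List.length_sorted]; omega)
  rw [hB] at heq
  have := List.drop_eq_nil_iff.mp heq
  rw [PySem.List.length_sorted] at this
  omega
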